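-- pv_equiv track=rewrite | github.com/Phoenix9733/Python_Homeworks | homework08.2/program01.py | conta_rossi
-- ===== SOURCE A (Python) =====
-- verde = (  0, 255,   0)
--
-- rosso = (255,   0,   0)
--
-- def conta_rossi(img):
--     conta_rosso=0
--     for j in range(len(img)):
--         for d in range(len(img[0])):
--             if img[j][d]==verde:
--                 n, o = j, d
--             if img[j][d]==rosso:
--                 conta_rosso+=1
--     return conta_rosso, n, o
-- ===== SOURCE B (Python) =====
-- verde = (0, 255, 0)
--
-- rosso = (255, 0, 0)
--
-- def conta_rossi(img):
--     h = len(img)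
--     w = len(img[0]) if img else 0
--     conta_rosso = sum(img[j][d] == rosso for j in range(h) for d in range(w))
--     for j in range(h - 1, -1, -1):
--         for d in range(w - 1, -1, -1):
--             if img[j][d] == verde:
--                 return conta_rosso, j, d
--     raise ValueError("no green pixel")
-- ===== Notes on version B (the rewrite author's own statement) =====
-- stated objective: alternative
-- what changed: A tracks the last green position by overwriting state at every green hit in one combined forward scan; B counts reds in a single flat sum and finds the last green by a reverse row-major scan that returns at the first hit.
import Mathlib
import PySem

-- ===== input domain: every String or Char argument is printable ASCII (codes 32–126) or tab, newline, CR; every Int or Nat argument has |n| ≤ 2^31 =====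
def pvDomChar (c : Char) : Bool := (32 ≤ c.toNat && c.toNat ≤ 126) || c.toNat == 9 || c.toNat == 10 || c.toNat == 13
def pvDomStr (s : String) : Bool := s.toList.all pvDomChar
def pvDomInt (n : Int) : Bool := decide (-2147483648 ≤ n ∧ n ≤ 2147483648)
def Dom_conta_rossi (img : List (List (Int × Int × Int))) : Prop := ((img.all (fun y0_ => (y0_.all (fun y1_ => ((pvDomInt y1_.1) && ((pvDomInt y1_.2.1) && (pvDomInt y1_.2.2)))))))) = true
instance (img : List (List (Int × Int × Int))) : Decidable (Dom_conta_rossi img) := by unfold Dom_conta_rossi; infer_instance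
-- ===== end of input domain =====

-- B replaces A's single forward scan with overwritten last-green state by a flat red-count sum
-- plus a reverse row-major search returning at the first green (alternative decomposition, same cost).


-- ===== PORT A =====
-- img[j][d]: pyGetD with a throwaway default; under Pre_ every accessed index is in range,
-- so the default is never the value used (Python raises exactly on the inputs Pre_ excludes).
def conta_rossi (img : List (List (Int × Int × Int))) : Int × Int × Int :=
  let st := (PySem.List.pyRange 0 (img.length) 1).foldl
    (fun (st : Int × Option (Int × Int)) j =>
      (PySem.List.pyRange 0 ((img.headD []).length) 1).foldl
        (fun st d =>
          let px := PySem.List.pyGetD (PySem.List.pyGetD img j []) d (0, 0, 0)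
          let st1 := if px = (((0:Int), (255:Int), (0:Int))) then (st.1, some (j, d)) else st
          if px = (((255:Int), (0:Int), (0:Int))) then (st1.1 + 1, st1.2) else st1)
        st)
    ((0 : Int), (none : Option (Int × Int)))
  match st.2 with
  | some (n, o) => (st.1, n, o)
  | none => (0, 0, 0)  -- Python raises UnboundLocalError here; excluded by Pre_

-- ===== PORT B =====
def conta_rossi_alt (img : List (List (Int × Int × Int))) : Int × Int × Int :=
  let h : Int := img.length
  let w : Int := if img = [] then 0 else ((img.headD []).length : Int)
  let conta : Int := (PySem.List.pyRange 0 h 1).foldl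
    (fun acc j =>
      (PySem.List.pyRange 0 w 1).foldl
        (fun acc d =>
          acc + (if PySem.List.pyGetD (PySem.List.pyGetD img j []) d (0, 0, 0)
                    = (((255:Int), (0:Int), (0:Int))) then 1 else 0))
        acc)
    0
  match (PySem.List.pyRange (h - 1) (-1) (-1)).findSome?
      (fun j =>
        (PySem.List.pyRange (w - 1) (-1) (-1)).findSome?
          (fun d =>
            if PySem.List.pyGetD (PySem.List.pyGetD img j []) d (0, 0, 0)
                = (((0:Int), (255:Int), (0:Int))) then some (j, d) else none)) with
  | some (n, o) => (conta, n, o)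
  | none => (0, 0, 0)  -- Python raises ValueError here; excluded by Pre_

-- ===== PRECONDITION & SPEC =====
-- Pre_ excludes exactly the inputs on which Python A raises: a row shorter than row 0
-- (IndexError) and images with no green pixel in the first len(img[0]) columns
-- (UnboundLocalError on n, o).
def Pre_conta_rossi (img : List (List (Int × Int × Int))) : Prop :=
  (∀ r ∈ img, (img.headD []).length ≤ r.length) ∧
  ∃ r ∈ img, ∃ p ∈ r.take (img.headD []).length, p = (((0:Int), (255:Int), (0:Int)))
instance (img : List (List (Int × Int × Int))) : Decidable (Pre_conta_rossi img) := by
  unfold Pre_conta_rossi; infer_instance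

def pvWitness_conta_rossi : (List (List (Int × Int × Int))) := [[(0, 255, 0)]]

def Spec_conta_rossi (img : List (List (Int × Int × Int))) (out : Int × Int × Int) : Prop := out = conta_rossi_alt img
instance (img : List (List (Int × Int × Int))) (out : Int × Int × Int) : Decidable (Spec_conta_rossi img out) := by unfold Spec_conta_rossi; infer_instance

-- ===== CLAIM (what is proved, stated in full; the proofs are below) =====
def Claim_equal_conta_rossi : Prop := ∀ (img : List (List (Int × Int × Int))), Dom_conta_rossi img → Pre_conta_rossi img → Spec_conta_rossi img (conta_rossi img)

-- ===== LEMMAS AND PROOFS =====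

-- pixel access shared by both ports
def pvPx (img : List (List (Int × Int × Int))) (p : Int × Int) : Int × Int × Int :=
  PySem.List.pyGetD (PySem.List.pyGetD img p.1 []) p.2 (0, 0, 0)

def pvGreenAt (img : List (List (Int × Int × Int))) (p : Int × Int) : Option (Int × Int) :=
  if pvPx img p = (((0:Int), (255:Int), (0:Int))) then some p else none

def pvCntStep (img : List (List (Int × Int × Int))) (acc : Int) (p : Int × Int) : Int :=
  acc + (if pvPx img p = (((255:Int), (0:Int), (0:Int))) then 1 else 0)

def pvStepA (img : List (List (Int × Int × Int))) (st : Int × Option (Int × Int))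
    (p : Int × Int) : Int × Option (Int × Int) :=
  let px := pvPx img p
  let st1 := if px = (((0:Int), (255:Int), (0:Int))) then (st.1, some p) else st
  if px = (((255:Int), (0:Int), (0:Int))) then (st1.1 + 1, st1.2) else st1

lemma pvStepA_eq (img : List (List (Int × Int × Int))) (c : Int) (o : Option (Int × Int))
    (p : Int × Int) :
    pvStepA img (c, o) p = (pvCntStep img c p, (pvGreenAt img p).or o) := by
  simp only [pvStepA, pvCntStep, pvGreenAt]
  by_cases hg : pvPx img p = (((0:Int), (255:Int), (0:Int)))
  · have hr : ¬ pvPx img p = (((255:Int), (0:Int), (0:Int))) := by rw [hg]; decide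
    simp [hg]
  · by_cases hr : pvPx img p = (((255:Int), (0:Int), (0:Int))) <;> simp [hg, hr]

-- main invariant of A's fold: the count accumulates, the state holds the LAST green seen
lemma pvFoldA (img : List (List (Int × Int × Int))) (ps : List (Int × Int)) :
    ∀ (c : Int) (o : Option (Int × Int)),
      ps.foldl (pvStepA img) (c, o)
        = (ps.foldl (pvCntStep img) c, (ps.reverse.findSome? (pvGreenAt img)).or o) := by
  induction ps with
  | nil => intro c o; simp
  | cons p ps ih =>
    intro c o
    rw [List.foldl_cons, pvStepA_eq, ih, List.reverse_cons, List.findSome?_append,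
      Option.or_assoc, List.foldl_cons]
    cases h : pvGreenAt img p <;> simp [h]

-- findSome? over a flatMap searches group by group
lemma pvFindSomeFlatMap {α β γ : Type} (l : List α) (f : α → List β) (g : β → Option γ) :
    (l.flatMap f).findSome? g = l.findSome? (fun x => (f x).findSome? g) := by
  induction l with
  | nil => simp
  | cons a l ih =>
    rw [List.flatMap_cons, List.findSome?_append, ih]
    cases h : (f a).findSome? g <;> simp [h]

-- row-major position list
def pvPos (h w : Int) : List (Int × Int) :=
  (PySem.List.pyRange 0 h 1).flatMap (fun j => (PySem.List.pyRange 0 w 1).map (fun d => (j, d)))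

lemma pvA_char (img : List (List (Int × Int × Int))) :
    conta_rossi img =
      match ((pvPos img.length (img.headD []).length).reverse.findSome? (pvGreenAt img)) with
      | some (n, o) => ((pvPos img.length (img.headD []).length).foldl (pvCntStep img) 0, n, o)
      | none => (0, 0, 0) := by
  have hfold :
      (PySem.List.pyRange 0 (img.length) 1).foldl
        (fun (st : Int × Option (Int × Int)) j =>
          (PySem.List.pyRange 0 ((img.headD []).length) 1).foldl
            (fun st d =>
              let px := PySem.List.pyGetD (PySem.List.pyGetD img j []) d (0, 0, 0)
              let st1 := if px = (((0:Int), (255:Int), (0:Int))) then (st.1, some (j, d)) else st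
              if px = (((255:Int), (0:Int), (0:Int))) then (st1.1 + 1, st1.2) else st1)
            st)
        ((0 : Int), (none : Option (Int × Int)))
      = (pvPos img.length (img.headD []).length).foldl (pvStepA img) (0, none) := by
    rw [pvPos, List.foldl_flatMap]
    congr 1
    funext st j
    rw [List.foldl_map]
    rfl
  simp only [conta_rossi]
  rw [hfold, pvFoldA]
  simp only [Option.or_none]

lemma pvB_char (img : List (List (Int × Int × Int))) (hne : img ≠ []) :
    conta_rossi_alt img =
      match ((pvPos img.length (img.headD []).length).reverse.findSome? (pvGreenAt img)) with
      | some (n, o) => ((pvPos img.length (img.headD []).length).foldl (pvCntStep img) 0, n, o)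
      | none => (0, 0, 0) := by
  have hw : (if img = [] then (0:Int) else ((img.headD []).length : Int))
      = ((img.headD []).length : Int) := by simp [hne]
  have hcnt :
      (PySem.List.pyRange 0 (img.length) 1).foldl
        (fun (acc : Int) j =>
          (PySem.List.pyRange 0 ((img.headD []).length) 1).foldl
            (fun acc d =>
              acc + (if PySem.List.pyGetD (PySem.List.pyGetD img j []) d (0, 0, 0)
                        = (((255:Int), (0:Int), (0:Int))) then 1 else 0))
            acc)
        (0 : Int)
      = (pvPos img.length (img.headD []).length).foldl (pvCntStep img) 0 := by
    rw [pvPos, List.foldl_flatMap]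
    congr 1
    funext acc j
    rw [List.foldl_map]
    rfl
  have h1 : ((-1 : Int) + 1) = 0 := by norm_num
  have h2 : ((img.length : Int) - 1 + 1) = (img.length : Int) := by ring
  have h3 : (((img.headD []).length : Int) - 1 + 1) = ((img.headD []).length : Int) := by ring
  have hfind :
      (PySem.List.pyRange ((img.length : Int) - 1) (-1) (-1)).findSome?
        (fun j =>
          (PySem.List.pyRange (((img.headD []).length : Int) - 1) (-1) (-1)).findSome?
            (fun d =>
              if PySem.List.pyGetD (PySem.List.pyGetD img j []) d (0, 0, 0)
                  = (((0:Int), (255:Int), (0:Int))) then some (j, d) else none))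
      = (pvPos img.length (img.headD []).length).reverse.findSome? (pvGreenAt img) := by
    rw [pvPos, List.reverse_flatMap, pvFindSomeFlatMap]
    rw [PySem.List.pyRange_neg_one_eq_reverse, h1, h3]
    rw [PySem.List.pyRange_neg_one_eq_reverse, h1, h2]
    congr 1
    funext j
    rw [Function.comp_apply, ← List.map_reverse, List.findSome?_map]
    rfl
  simp only [conta_rossi_alt]
  rw [hw, hcnt, hfind]

-- ===== VERDICT (by name: the statement is the Claim_ definition above) =====
theorem conta_rossi_spec : Claim_equal_conta_rossi := by
  intro img _ hpre
  have hne : img ≠ [] := by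
    rcases hpre.2 with ⟨r, hr, _⟩
    intro h; subst h; simp at hr
  show conta_rossi img = conta_rossi_alt img
  rw [pvA_char, pvB_char img hne]
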